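-- pv_equiv track=rewrite | github.com/ZhiyuDream/Code_Graph | tools/eval_graph_coverage.py | _count_evidence_matched
-- ===== SOURCE A (Python) =====
-- def _normalize_path_for_match(p: str) -> str:
--     return (p or "").strip().replace("\\", "/").rstrip("/")
--
-- def _path_matches(e: str, r: str) -> bool:
--     """Evidence 路径 e 与图中路径 r 是否视为同一文件。"""
--     if not e or not r:
--         return False
--     if e == r:
--         return True
--     if r.endswith("/" + e) or r.endswith(e):
--         return True
--     if e.endswith("/" + r) or e.endswith(r):
--         return True
--     return False
--
-- def _count_evidence_matched(evidence_set: set[str], graph_paths: set[str]) -> int: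
--     """Evidence 中有多少条路径能在 graph_paths 中匹配到至少一个。"""
--     if not evidence_set:
--         return 0
--     n = 0
--     for e in evidence_set:
--         en = _normalize_path_for_match(e)
--         if not en:
--             continue
--         for g in graph_paths:
--             if _path_matches(en, g):
--                 n += 1
--                 break
--     return n
-- ===== SOURCE B (Python) =====
-- def _normalize_path_for_match(p: str) -> str:
--     return (p or "").strip().replace("\\", "/").rstrip("/")
--
-- def _count_evidence_matched(evidence_set, graph_paths):
--     # Index once: all non-empty graph paths, and every suffix of each of them.
--     # en matches some g  iff  en is a suffix of g (en in suffixes)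
--     #                     or  some suffix of en equals g (en[i:] in paths).
--     paths = {g for g in graph_paths if g}
--     suffixes = {g[i:] for g in paths for i in range(len(g))}
--     n = 0
--     for e in evidence_set:
--         en = _normalize_path_for_match(e)
--         if en and (en in suffixes or any(en[i:] in paths for i in range(len(en)))):
--             n += 1
--     return n
-- ===== Notes on version B (the rewrite author's own statement) =====
-- stated objective: faster
-- what changed: Replaces the nested evidence-by-graph scan with a hash index built once (the set of non-empty graph paths and the set of all their suffixes); each evidence is then decided by membership lookups only, using that matching reduces to 'en is a suffix of some g or some suffix of en is a g'.
import Mathlib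
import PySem

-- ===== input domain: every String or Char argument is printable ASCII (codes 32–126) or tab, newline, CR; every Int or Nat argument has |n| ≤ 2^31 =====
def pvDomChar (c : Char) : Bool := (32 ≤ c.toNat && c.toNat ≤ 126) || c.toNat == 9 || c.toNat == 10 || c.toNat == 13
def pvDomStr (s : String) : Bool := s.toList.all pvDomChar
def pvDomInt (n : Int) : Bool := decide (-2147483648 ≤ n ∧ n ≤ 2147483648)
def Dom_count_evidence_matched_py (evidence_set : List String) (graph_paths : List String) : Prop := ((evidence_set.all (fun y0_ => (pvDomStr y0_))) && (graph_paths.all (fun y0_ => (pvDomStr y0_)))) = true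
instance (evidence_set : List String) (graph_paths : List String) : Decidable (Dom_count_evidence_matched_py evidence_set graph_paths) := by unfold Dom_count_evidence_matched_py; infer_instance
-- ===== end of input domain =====

-- B replaces A's evidence×graph nested scan by a set index of the non-empty graph paths
-- and of all their suffixes, built once; each evidence is then decided by membership only.
-- Return-value equivalence; neither version mutates its arguments.

-- ===== PORT A =====
-- .rstrip("/") has no PySem primitive; ported by hand (exact: removes all trailing '/' characters)
def rstripSlash (cs : List Char) : List Char := (cs.reverse.dropWhile (fun c => c == '/')).reverse

-- (p or "").strip().replace("\\", "/").rstrip("/")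
def normalize_path_for_match (p : String) : String :=
  String.ofList (rstripSlash (PySem.Chars.replace
    (PySem.Chars.strip (if p == "" then "" else p).toList) ['\\'] ['/']))

def path_matches (e r : String) : Bool :=
  if e.toList == [] || r.toList == [] then false
  else if e == r then true
  else if PySem.Chars.endswith r.toList ('/' :: e.toList) || PySem.Chars.endswith r.toList e.toList then true
  else if PySem.Chars.endswith e.toList ('/' :: r.toList) || PySem.Chars.endswith e.toList r.toList then true
  else false

-- the inner 'for g in graph_paths: if _path_matches(en, g): n += 1; break'
def anyMatchA (en : String) : List String → Bool
  | [] => false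
  | g :: rest => if path_matches en g then true else anyMatchA en rest

-- one iteration of the outer 'for e in evidence_set' loop
def stepA (graph_paths : List String) (n : Int) (e : String) : Int :=
  let en := normalize_path_for_match e
  if en == "" then n
  else if anyMatchA en graph_paths then n + 1 else n

def count_evidence_matched_py (evidence_set : List String) (graph_paths : List String) : Int :=
  if evidence_set == [] then 0
  else evidence_set.foldl (stepA graph_paths) 0

-- ===== PORT B =====
-- paths = {g for g in graph_paths if g}
def nonemptyPaths (graph_paths : List String) : PySem.Set String :=
  PySem.Set.ofList (graph_paths.filter (fun g => !(g == "")))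

-- suffixes = {g[i:] for g in paths for i in range(len(g))}
def suffixIndex (paths : PySem.Set String) : PySem.Set String :=
  paths.foldl (fun s g =>
    (PySem.List.pyRange 0 (PySem.Str.len g)).foldl
      (fun s i => PySem.Set.add s (PySem.Str.slice g (some i) none)) s)
    PySem.Set.empty

-- one iteration of B's evidence loop, against the precomputed indexes
def stepB (paths suffixes : PySem.Set String) (n : Int) (e : String) : Int :=
  let en := normalize_path_for_match e
  if !(en == "") && (PySem.Set.contains suffixes en
      || (PySem.List.pyRange 0 (PySem.Str.len en)).any
           (fun i => PySem.Set.contains paths (PySem.Str.slice en (some i) none)))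
    then n + 1 else n

def count_evidence_matched_py_alt (evidence_set : List String) (graph_paths : List String) : Int :=
  let paths := nonemptyPaths graph_paths
  let suffixes := suffixIndex paths
  evidence_set.foldl (stepB paths suffixes) 0

-- ===== PRECONDITION & SPEC =====
def Spec_count_evidence_matched_py (evidence_set : List String) (graph_paths : List String) (out : Int) : Prop := out = count_evidence_matched_py_alt evidence_set graph_paths
instance (evidence_set : List String) (graph_paths : List String) (out : Int) : Decidable (Spec_count_evidence_matched_py evidence_set graph_paths out) := by unfold Spec_count_evidence_matched_py; infer_instance

-- ===== CLAIM (what is proved, stated in full; the proofs are below) =====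
def Claim_equal_count_evidence_matched_py : Prop := ∀ (evidence_set : List String) (graph_paths : List String), Dom_count_evidence_matched_py evidence_set graph_paths → Spec_count_evidence_matched_py evidence_set graph_paths (count_evidence_matched_py evidence_set graph_paths)

-- ===== LEMMAS AND PROOFS =====

-- a nonempty list is a suffix iff it is a 'drop' at an index below the length
theorem suffix_iff_exists_drop (x g : List Char) (hx : x ≠ []) :
    (x <:+ g) ↔ ∃ k, k < g.length ∧ x = g.drop k := by
  constructor
  · intro h
    refine ⟨g.length - x.length, ?_, List.suffix_iff_eq_drop.mp h⟩
    have h1 := List.IsSuffix.length_le h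
    have h2 : 0 < x.length := List.length_pos_iff.mpr hx
    omega
  · rintro ⟨k, _, rfl⟩
    exact List.drop_suffix k g

-- characterization of A's matcher for a nonempty evidence path
theorem path_matches_iff (e r : String) (he : e.toList ≠ []) :
    path_matches e r = true ↔ r.toList ≠ [] ∧ (e.toList <:+ r.toList ∨ r.toList <:+ e.toList) := by
  unfold path_matches
  by_cases hr : r.toList = []
  · simp [hr]
  · have he' : e ≠ "" := fun h => he (by simp [h])
    have hr' : r ≠ "" := fun h => hr (by simp [h])
    rw [if_neg (by simp [he', hr'])]
    by_cases heq : e = r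
    · subst heq
      simp [he']
    · rw [if_neg (by simp [heq])]
      constructor
      · intro h
        refine ⟨hr, ?_⟩
        split_ifs at h with h1 h2
        · rcases Bool.or_eq_true_iff.mp h1 with h1 | h1
          · exact Or.inl (List.IsSuffix.trans (List.suffix_cons '/' e.toList) ((PySem.Chars.endswith_iff _ _).mp h1))
          · exact Or.inl ((PySem.Chars.endswith_iff _ _).mp h1)
        · rcases Bool.or_eq_true_iff.mp h2 with h2 | h2
          · exact Or.inr (List.IsSuffix.trans (List.suffix_cons '/' r.toList) ((PySem.Chars.endswith_iff _ _).mp h2))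
          · exact Or.inr ((PySem.Chars.endswith_iff _ _).mp h2)
      · rintro ⟨-, h | h⟩
        · have : PySem.Chars.endswith r.toList e.toList = true := (PySem.Chars.endswith_iff _ _).mpr h
          simp [this]
        · have : PySem.Chars.endswith e.toList r.toList = true := (PySem.Chars.endswith_iff _ _).mpr h
          by_cases h1 : PySem.Chars.endswith r.toList ('/' :: e.toList) || PySem.Chars.endswith r.toList e.toList
          · simp [h1]
          · simp [h1, this]

-- the 'for … break' loop is List.any
theorem anyMatchA_eq_any (en : String) (gs : List String) :
    anyMatchA en gs = gs.any (fun g => path_matches en g) := by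
  induction gs with
  | nil => rfl
  | cons g rest ih =>
    simp only [anyMatchA, List.any_cons, ih]
    by_cases h : path_matches en g <;> simp [h]

-- membership after folding 'add (f i)' over a list
theorem mem_foldl_add {β : Type} (f : β → String) (l : List β) (s : PySem.Set String) (x : String) :
    x ∈ l.foldl (fun s i => PySem.Set.add s (f i)) s ↔ x ∈ s ∨ ∃ i ∈ l, x = f i := by
  induction l generalizing s with
  | nil => simp
  | cons a t ih =>
    simp only [List.foldl_cons, ih, PySem.Set.mem_add, List.mem_cons]
    constructor
    · rintro ((h | h) | ⟨i, hi, rfl⟩)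
      · exact Or.inl h
      · exact Or.inr ⟨a, Or.inl rfl, h⟩
      · exact Or.inr ⟨i, Or.inr hi, rfl⟩
    · rintro (h | ⟨i, (rfl | hi), rfl⟩)
      · exact Or.inl (Or.inl h)
      · exact Or.inl (Or.inr rfl)
      · exact Or.inr ⟨i, hi, rfl⟩

-- a slice g[i:] for i taken from range(len(g)), on the character level
theorem toList_slice_drop (g : String) (k : Nat) :
    (PySem.Str.slice g (some (k : Int)) none).toList = g.toList.drop k := by
  simp [PySem.Str.toList_slice, PySem.Chars.slice_eq_listSlice, PySem.List.slice_from_natCast]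

-- what lives in the suffix index
theorem mem_suffixIndex (paths : PySem.Set String) (x : String) :
    x ∈ suffixIndex paths ↔ ∃ g ∈ paths, ∃ k, k < g.toList.length ∧ x.toList = g.toList.drop k := by
  unfold suffixIndex
  have main : ∀ (l : List String) (s : PySem.Set String),
      x ∈ l.foldl (fun s g =>
        (PySem.List.pyRange 0 (PySem.Str.len g)).foldl
          (fun s i => PySem.Set.add s (PySem.Str.slice g (some i) none)) s) s
      ↔ x ∈ s ∨ ∃ g ∈ l, ∃ k, k < g.toList.length ∧ x.toList = g.toList.drop k := by
    intro l
    induction l with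
    | nil => simp
    | cons a t ih =>
      intro s
      simp only [List.foldl_cons, ih, mem_foldl_add, List.mem_cons]
      have hrange : ∀ i : Int, i ∈ PySem.List.pyRange 0 (PySem.Str.len a) ↔ 0 ≤ i ∧ i < (a.toList.length : Int) := by
        intro i; rw [PySem.Str.len_eq]; exact PySem.List.mem_pyRange_one
      constructor
      · rintro ((h | ⟨i, hi, rfl⟩) | ⟨g, hg, k, hk, hx⟩)
        · exact Or.inl h
        · rcases (hrange i).mp hi with ⟨h0, hlt⟩
          refine Or.inr ⟨a, Or.inl rfl, i.toNat, by omega, ?_⟩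
          have : i = ((i.toNat : Nat) : Int) := by omega
          rw [this, toList_slice_drop]
          congr 1
        · exact Or.inr ⟨g, Or.inr hg, k, hk, hx⟩
      · rintro (h | ⟨g, (rfl | hg), k, hk, hx⟩)
        · exact Or.inl (Or.inl h)
        · refine Or.inl (Or.inr ⟨(k : Int), (hrange _).mpr ⟨by omega, by omega⟩, ?_⟩)
          apply String.toList_inj.mp
          rw [toList_slice_drop]; exact hx
        · exact Or.inr ⟨g, hg, k, hk, hx⟩
  rw [main paths PySem.Set.empty]
  simp [PySem.Set.empty]

-- membership in the path set
theorem mem_nonemptyPaths (graph_paths : List String) (g : String) :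
    g ∈ nonemptyPaths graph_paths ↔ g ∈ graph_paths ∧ g.toList ≠ [] := by
  unfold nonemptyPaths
  rw [PySem.Set.mem_ofList, List.mem_filter]
  have hiff : (!(g == "")) = true ↔ g.toList ≠ [] := by
    constructor
    · intro h hnil
      have hg : g = "" := String.toList_inj.mp (by simpa using hnil)
      subst hg; simp at h
    · intro h2
      simp only [Bool.not_eq_true', beq_eq_false_iff_ne, ne_eq]
      intro hg; subst hg; exact h2 rfl
  tauto

-- the central per-evidence equivalence: A's scan equals B's two membership tests
theorem central (en : String) (he : en.toList ≠ []) (gs : List String) :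
    anyMatchA en gs =
      (PySem.Set.contains (suffixIndex (nonemptyPaths gs)) en
        || (PySem.List.pyRange 0 (PySem.Str.len en)).any
             (fun i => PySem.Set.contains (nonemptyPaths gs) (PySem.Str.slice en (some i) none))) := by
  rw [anyMatchA_eq_any, Bool.eq_iff_iff]
  simp only [List.any_eq_true, Bool.or_eq_true]
  constructor
  · rintro ⟨g, hg, hm⟩
    rcases (path_matches_iff en g he).mp hm with ⟨hgne, h | h⟩
    · left
      rw [PySem.Set.contains_iff, mem_suffixIndex]
      refine ⟨g, (mem_nonemptyPaths gs g).mpr ⟨hg, hgne⟩, ?_⟩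
      rcases (suffix_iff_exists_drop _ _ he).mp h with ⟨k, hk, hx⟩
      exact ⟨k, hk, hx⟩
    · right
      rcases (suffix_iff_exists_drop _ _ hgne).mp h with ⟨k, hk, hx⟩
      refine ⟨(k : Int), ?_, ?_⟩
      · rw [PySem.Str.len_eq, PySem.List.mem_pyRange_one]; omega
      · rw [PySem.Set.contains_iff, mem_nonemptyPaths]
        have : PySem.Str.slice en (some (k : Int)) none = g :=
          String.toList_inj.mp (by rw [toList_slice_drop]; exact hx.symm)
        rw [this]; exact ⟨hg, hgne⟩
  · rintro (h | ⟨i, hi, hc⟩)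
    · rw [PySem.Set.contains_iff, mem_suffixIndex] at h
      rcases h with ⟨g, hg, k, hk, hx⟩
      rcases (mem_nonemptyPaths gs g).mp hg with ⟨hgmem, hgne⟩
      refine ⟨g, hgmem, (path_matches_iff en g he).mpr ⟨hgne, Or.inl ?_⟩⟩
      rw [hx]; exact List.drop_suffix k g.toList
    · rw [PySem.Str.len_eq, PySem.List.mem_pyRange_one] at hi
      rw [PySem.Set.contains_iff, mem_nonemptyPaths] at hc
      rcases hc with ⟨hgmem, hgne⟩
      refine ⟨_, hgmem, (path_matches_iff en _ he).mpr ⟨hgne, Or.inr ?_⟩⟩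
      have hi' : i = ((i.toNat : Nat) : Int) := by omega
      rw [hi', toList_slice_drop]
      exact List.drop_suffix _ _
  
-- per-evidence step test, for an arbitrary (already normalized) path
theorem step_eq' (gs : List String) (n : Int) (en : String) :
    (if en == "" then n else if anyMatchA en gs then n + 1 else n) =
    (if !(en == "") && (PySem.Set.contains (suffixIndex (nonemptyPaths gs)) en
        || (PySem.List.pyRange 0 (PySem.Str.len en)).any
             (fun i => PySem.Set.contains (nonemptyPaths gs) (PySem.Str.slice en (some i) none)))
       then n + 1 else n) := by
  by_cases h : en = ""
  · subst h; simp
  · have he : en.toList ≠ [] := fun hnil => h (String.toList_inj.mp (by simpa using hnil))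
    have hb : (en == "") = false := beq_eq_false_iff_ne.mpr h
    rw [hb, ← central en he gs]
    simp

-- the two per-evidence steps agree
theorem step_eq (gs : List String) (n : Int) (e : String) :
    stepA gs n e = stepB (nonemptyPaths gs) (suffixIndex (nonemptyPaths gs)) n e :=
  step_eq' gs n (normalize_path_for_match e)

-- ===== VERDICT (by name: the statement is the Claim_ definition above) =====
theorem count_evidence_matched_py_spec : Claim_equal_count_evidence_matched_py := by
  intro evidence_set graph_paths _
  unfold Spec_count_evidence_matched_py
  have halt : count_evidence_matched_py_alt evidence_set graph_paths =
      evidence_set.foldl (stepB (nonemptyPaths graph_paths) (suffixIndex (nonemptyPaths graph_paths))) 0 := rfl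
  rw [halt]
  unfold count_evidence_matched_py
  rcases evidence_set with _ | ⟨e, es⟩
  · rfl
  · rw [if_neg (by simp)]
    exact PySem.List.foldl_congr_mem _ _ _ _ (fun n x _ => step_eq graph_paths n x)
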